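-- pv_equiv track=rewrite | github.com/oss-spanish-geoserver/tile_data_extractor | tile_data_extractor/services/extraction.py | __coordinates_from_bbox_data
-- ===== SOURCE A (Python) =====
-- def __coordinates_from_bbox_data(bbox_data):
--     """
--     Extract bounding box coordinates from raw data
--     """
--     if bbox_data['bbox_3d']:
--         bbox = []
--         list_bbox = bbox_data['bbox_3d'].split(',')
--         for part in list_bbox:
--             bbox.extend(part.split(' '))
--     elif bbox_data['bbox_env']:
--         bbox = bbox_data['bbox_env'].split(',')
--     return bbox
-- ===== SOURCE B (Python) =====
-- def __coordinates_from_bbox_data(bbox_data):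
--     """
--     Extract bounding box coordinates from raw data
--     """
--     if bbox_data['bbox_3d']:
--         out = []
--         cur = ''
--         for ch in bbox_data['bbox_3d']:
--             if ch == ',' or ch == ' ':
--                 out.append(cur)
--                 cur = ''
--             else:
--                 cur += ch
--         out.append(cur)
--         return out
--     elif bbox_data['bbox_env']:
--         out = []
--         cur = ''
--         for ch in bbox_data['bbox_env']:
--             if ch == ',':
--                 out.append(cur)
--                 cur = ''
--             else:
--                 cur += ch
--         out.append(cur)
--         return out
-- ===== Notes on version B (the rewrite author's own statement) =====
-- stated objective: alternative
-- what changed: The staged library splits (split(',') then per-part split(' ') and extend; split(',') in the elif) are replaced by a hand-written single-pass character scanner that walks the string once with an explicit current-token accumulator, treating ',' and ' ' as one delimiter class in the bbox_3d branch.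
import Mathlib
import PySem

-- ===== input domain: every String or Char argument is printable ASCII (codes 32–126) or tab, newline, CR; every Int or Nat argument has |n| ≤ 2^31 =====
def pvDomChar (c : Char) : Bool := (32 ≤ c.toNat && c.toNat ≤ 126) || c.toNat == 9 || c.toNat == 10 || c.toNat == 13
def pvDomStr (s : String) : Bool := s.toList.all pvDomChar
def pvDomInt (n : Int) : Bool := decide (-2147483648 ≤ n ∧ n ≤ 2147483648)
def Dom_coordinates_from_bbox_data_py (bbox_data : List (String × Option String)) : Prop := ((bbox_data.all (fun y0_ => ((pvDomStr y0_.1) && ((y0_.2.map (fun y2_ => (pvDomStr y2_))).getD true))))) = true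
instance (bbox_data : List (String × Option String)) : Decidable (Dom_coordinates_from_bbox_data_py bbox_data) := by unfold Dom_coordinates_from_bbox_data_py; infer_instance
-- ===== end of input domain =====

-- B replaces the staged library splits (split(',') then per-part split(' ') + extend) by a
-- hand-written single-pass character scanner with an explicit current-token accumulator;
-- equal return values on Pre_.


-- shared helpers: dict lookup (first match) and Python truthiness of an Optional[str]
def pvLookup (d : List (String × Option String)) (k : String) : Option (Option String) :=
  (d.find? (fun p => p.1 == k)).map (·.2)

def pvTruthy : Option (Option String) → Bool
  | some (some s) => !(s == "")
  | _ => false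

-- ===== PORT A =====
-- bbox = []; for part in bbox_3d.split(','): bbox.extend(part.split(' '))
-- (missing key / both values falsy would raise in Python: excluded by Pre_, port returns [])
def coordinates_from_bbox_data_py (bbox_data : List (String × Option String)) : List String :=
  if pvTruthy (pvLookup bbox_data "bbox_3d") then
    match pvLookup bbox_data "bbox_3d" with
    | some (some s) =>
        ((PySem.Str.split? s ",").getD []).foldl
          (fun bbox part => bbox ++ (PySem.Str.split? part " ").getD []) []
    | _ => []
  else if pvTruthy (pvLookup bbox_data "bbox_env") then
    match pvLookup bbox_data "bbox_env" with
    | some (some s) => (PySem.Str.split? s ",").getD []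
    | _ => []
  else []

-- ===== PORT B =====
-- Source B's character loop: state (out, cur); a delimiter char emits cur and resets it,
-- any other char is appended to cur; after the loop the final cur is emitted.
def tokLoop (p : Char → Bool) : List Char → List String → List Char → List String
  | [], out, cur => out ++ [String.ofList cur]
  | c :: t, out, cur =>
      if p c then tokLoop p t (out ++ [String.ofList cur]) []
      else tokLoop p t out (cur ++ [c])

def coordinates_from_bbox_data_py_alt (bbox_data : List (String × Option String)) : List String :=
  if pvTruthy (pvLookup bbox_data "bbox_3d") then
    match pvLookup bbox_data "bbox_3d" with
    | some (some s) => tokLoop (fun c => c == ',' || c == ' ') s.toList [] []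
    | _ => []
  else if pvTruthy (pvLookup bbox_data "bbox_env") then
    match pvLookup bbox_data "bbox_env" with
    | some (some s) => tokLoop (fun c => c == ',') s.toList [] []
    | _ => []
  else []

-- ===== PRECONDITION & SPEC =====
-- Pre_ excludes only inputs where the Python A raises: a missing 'bbox_3d' key (KeyError),
-- a falsy 'bbox_3d' with a missing 'bbox_env' key (KeyError), and both values falsy
-- (UnboundLocalError); A returns on every admitted input.
def Pre_coordinates_from_bbox_data_py (bbox_data : List (String × Option String)) : Prop :=
  pvTruthy (pvLookup bbox_data "bbox_3d") = true ∨
    (pvLookup bbox_data "bbox_3d" ≠ none ∧ pvTruthy (pvLookup bbox_data "bbox_env") = true)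
instance (bbox_data : List (String × Option String)) : Decidable (Pre_coordinates_from_bbox_data_py bbox_data) := by unfold Pre_coordinates_from_bbox_data_py; infer_instance

def pvWitness_coordinates_from_bbox_data_py : (List (String × Option String)) :=
  [("bbox_3d", some "1 2 0,3 4 0"), ("bbox_env", some "1,2,3,4")]

def Spec_coordinates_from_bbox_data_py (bbox_data : List (String × Option String)) (out : List String) : Prop := out = coordinates_from_bbox_data_py_alt bbox_data
instance (bbox_data : List (String × Option String)) (out : List String) : Decidable (Spec_coordinates_from_bbox_data_py bbox_data out) := by unfold Spec_coordinates_from_bbox_data_py; infer_instance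

-- ===== CLAIM (what is proved, stated in full; the proofs are below) =====
def Claim_equal_coordinates_from_bbox_data_py : Prop := ∀ (bbox_data : List (String × Option String)), Dom_coordinates_from_bbox_data_py bbox_data → Pre_coordinates_from_bbox_data_py bbox_data → Spec_coordinates_from_bbox_data_py bbox_data (coordinates_from_bbox_data_py bbox_data)

-- ===== LEMMAS AND PROOFS =====

-- clean delimiter-predicate split, used only by the proof
def splitP (p : Char → Bool) : List Char → List (List Char)
  | [] => [[]]
  | a :: t => if p a then [] :: splitP p t else (splitP p t).modifyHead (a :: ·)

theorem splitP_ne_nil (p : Char → Bool) (l : List Char) : splitP p l ≠ [] := by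
  cases l with
  | nil => simp [splitP]
  | cons a t =>
    simp only [splitP]
    split_ifs
    · simp
    · cases h : splitP p t with
      | nil => exact absurd h (splitP_ne_nil p t)
      | cons q qs => simp

theorem splitOn_go_eq (c : Char) : ∀ (fuel : Nat) (l cur : List Char) (acc : List (List Char)),
    l.length < fuel →
    PySem.Chars.splitOn.go [c] fuel l cur acc
      = acc.reverse ++ (splitP (· == c) l).modifyHead (cur.reverse ++ ·) := by
  intro fuel
  induction fuel with
  | zero => intro l cur acc h; omega
  | succ n ih =>
    intro l cur acc h
    cases l with
    | nil =>
      rw [PySem.Chars.splitOn.go.eq_def]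
      simp [splitP]
    | cons a t =>
      rw [PySem.Chars.splitOn.go.eq_def]
      simp only [List.isPrefixOf, List.isPrefixOf_nil_left]
      by_cases hac : a = c
      · subst hac
        simp only [beq_self_eq_true, Bool.true_and, if_pos, List.length_cons,
          List.length_nil, Nat.zero_add, List.drop_succ_cons, List.drop_zero]
        rw [ih t [] (cur.reverse :: acc) (by simpa using Nat.lt_of_succ_lt_succ h)]
        cases hsp : splitP (· == a) t with
        | nil => exact absurd hsp (splitP_ne_nil _ t)
        | cons q qs => simp [splitP, hsp, List.modifyHead]
      · have hca : (c == a) = false := beq_eq_false_iff_ne.mpr (Ne.symm hac)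
        simp only [hca, Bool.false_and, if_neg Bool.false_ne_true]
        rw [ih t (a :: cur) acc (by simpa using Nat.lt_of_succ_lt_succ h)]
        simp only [splitP, beq_eq_false_iff_ne, if_neg hac]
        cases hsp : splitP (· == c) t with
        | nil => exact absurd hsp (splitP_ne_nil _ t)
        | cons q qs => simp [hsp, List.modifyHead, if_neg hac]

theorem splitOn_single (c : Char) (l : List Char) :
    PySem.Chars.splitOn l [c] = splitP (· == c) l := by
  unfold PySem.Chars.splitOn
  rw [splitOn_go_eq c (l.length + 1) l [] [] (Nat.lt_succ_self _)]
  cases hsp : splitP (· == c) l with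
  | nil => exact absurd hsp (splitP_ne_nil _ l)
  | cons q qs => simp

-- B's loop computes the predicate split, token by token
theorem tokLoop_eq (p : Char → Bool) : ∀ (l : List Char) (out : List String) (cur : List Char),
    tokLoop p l out cur = out ++ ((splitP p l).modifyHead (cur ++ ·)).map String.ofList := by
  intro l
  induction l with
  | nil => intro out cur; simp [tokLoop, splitP]
  | cons a t ih =>
    intro out cur
    simp only [tokLoop, splitP]
    by_cases hp : p a = true
    · simp only [hp, if_pos rfl]
      rw [ih]
      cases hsp : splitP p t with
      | nil => exact absurd hsp (splitP_ne_nil p t)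
      | cons q qs => simp [hsp, List.modifyHead]
    · simp only [hp, Bool.false_eq_true, if_false, if_neg]
      rw [ih]
      cases hsp : splitP p t with
      | nil => exact absurd hsp (splitP_ne_nil p t)
      | cons q qs => simp [hsp, List.modifyHead]

-- the heart: splitting on the combined delimiter class = the nested two-level flatten
theorem splitP_both (l : List Char) :
    splitP (fun c => c == ',' || c == ' ') l
      = (splitP (· == ',') l).flatMap (splitP (· == ' ')) := by
  induction l with
  | nil => simp [splitP]
  | cons a t ih =>
    by_cases hc : a = ','
    · subst hc
      simp [splitP, ih]
    · by_cases hs : a = ' '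
      · subst hs
        simp only [splitP, beq_self_eq_true, Bool.or_true, if_pos, if_neg hc]
        cases hsp : splitP (· == ',') t with
        | nil => exact absurd hsp (splitP_ne_nil _ t)
        | cons q qs =>
          rw [hsp] at ih
          simp [splitP, ih, hsp]
      · have h1 : (a == ',' || a == ' ') = false := by
          simp [beq_eq_false_iff_ne, hc, hs]
        simp only [splitP, h1, Bool.false_eq_true, if_false, if_neg hc, if_neg hs]
        cases hsp : splitP (· == ',') t with
        | nil => exact absurd hsp (splitP_ne_nil _ t)
        | cons q qs =>
          rw [hsp] at ih
          cases hq : splitP (· == ' ') q with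
          | nil => exact absurd hq (splitP_ne_nil _ q)
          | cons r rs => simp [ih, splitP, if_neg hs, if_neg hc, hq, List.modifyHead]

theorem split?_getD (s sep : String) (h : sep.toList.isEmpty = false) :
    (PySem.Str.split? s sep).getD []
      = (PySem.Chars.splitOn s.toList sep.toList).map String.ofList := by
  simp [PySem.Str.split?, PySem.Chars.split?, h]

theorem modifyHead_id_fun (l : List (List Char)) : l.modifyHead (fun x => x) = l := by
  cases l <;> simp [List.modifyHead]

-- the two branch equalities
theorem branch3d_eq (s : String) :
    ((PySem.Str.split? s ",").getD []).foldl
        (fun bbox part => bbox ++ (PySem.Str.split? part " ").getD []) []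
      = tokLoop (fun c => c == ',' || c == ' ') s.toList [] [] := by
  rw [PySem.List.foldl_append_eq_flatMap (fun part => (PySem.Str.split? part " ").getD []) _ []]
  simp only [List.nil_append, split?_getD _ "," (by decide), split?_getD _ " " (by decide)]
  rw [List.flatMap_map, tokLoop_eq]
  have h1 : (",".toList) = [','] := rfl
  have h2 : (" ".toList) = [' '] := rfl
  simp only [h1, h2, splitOn_single, String.toList_ofList, splitP_both,
    List.nil_append, modifyHead_id_fun, List.map_flatMap]

theorem branchEnv_eq (s : String) :
    (PySem.Str.split? s ",").getD [] = tokLoop (fun c => c == ',') s.toList [] [] := by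
  rw [split?_getD _ "," (by decide), tokLoop_eq]
  have h1 : (",".toList) = [','] := rfl
  simp only [h1, splitOn_single, List.nil_append, modifyHead_id_fun]

-- ===== VERDICT (by name: the statement is the Claim_ definition above) =====
theorem coordinates_from_bbox_data_py_spec : Claim_equal_coordinates_from_bbox_data_py := by
  intro bbox_data _ _
  unfold Spec_coordinates_from_bbox_data_py
  unfold coordinates_from_bbox_data_py coordinates_from_bbox_data_py_alt
  by_cases h3 : pvTruthy (pvLookup bbox_data "bbox_3d") = true
  · simp only [h3, if_pos]
    cases hl : pvLookup bbox_data "bbox_3d" with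
    | none => rfl
    | some v =>
      cases v with
      | none => rfl
      | some s => exact branch3d_eq s
  · simp only [h3, Bool.false_eq_true, if_false]
    by_cases he : pvTruthy (pvLookup bbox_data "bbox_env") = true
    · simp only [he, if_pos]
      cases hl : pvLookup bbox_data "bbox_env" with
      | none => rfl
      | some v =>
        cases v with
        | none => rfl
        | some s => exact branchEnv_eq s
    · simp only [he, Bool.false_eq_true, if_false]
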